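-- pv_equiv track=rewrite | github.com/justinlimkz/gob | bot_justin_0/value.py | double_sided_straight
-- ===== SOURCE A (Python) =====
-- def double_sided_straight(hand): #checks if we have a 4-card, double sided straight
--     nums = []
--     card_dict={'A':14,'2':2,'3':3,'4':4,'5':5,'6':6,'7':7,'8':8,'9':9,'T':10,'J':11,'Q':12,'K':13}
--     for card in hand:
--         nums.append(card_dict[card[0]])
--     for i in reversed(range(2, 11)):
--         straight = True
--         for j in range(i, i+4):
--             if j not in nums:
--                 straight = False
--                 break
--         if straight:
--             return i
--     return False
-- ===== SOURCE B (Python) =====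
-- def _best_start(lo, hi):
--     # best eligible start of a 4-window inside the consecutive run [lo..hi]
--     start = min(hi - 3, 10)
--     return start if start >= lo else 0
--
-- def double_sided_straight(hand):
--     card_dict = {'A': 14, '2': 2, '3': 3, '4': 4, '5': 5, '6': 6, '7': 7,
--                  '8': 8, '9': 9, 'T': 10, 'J': 11, 'Q': 12, 'K': 13}
--     vals = sorted({card_dict[card[0]] for card in hand})
--     best = 0
--     run = None  # (lo, prev) of the current maximal run of consecutive values
--     for v in vals:
--         if run is None:
--             run = (v, v)
--         elif v == run[1] + 1:
--             run = (run[0], v)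
--         else:
--             best = max(best, _best_start(run[0], run[1]))
--             run = (v, v)
--     if run is not None:
--         best = max(best, _best_start(run[0], run[1]))
--     return best if best else False
-- ===== Notes on version B (the rewrite author's own statement) =====
-- stated objective: alternative
-- what changed: Instead of scanning candidate starts 10..2 and testing each 4-value window by repeated membership scans of the whole hand, B builds the sorted set of distinct rank values once and detects maximal consecutive runs in a single pass, scoring each run by its best eligible window start.
import Mathlib
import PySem

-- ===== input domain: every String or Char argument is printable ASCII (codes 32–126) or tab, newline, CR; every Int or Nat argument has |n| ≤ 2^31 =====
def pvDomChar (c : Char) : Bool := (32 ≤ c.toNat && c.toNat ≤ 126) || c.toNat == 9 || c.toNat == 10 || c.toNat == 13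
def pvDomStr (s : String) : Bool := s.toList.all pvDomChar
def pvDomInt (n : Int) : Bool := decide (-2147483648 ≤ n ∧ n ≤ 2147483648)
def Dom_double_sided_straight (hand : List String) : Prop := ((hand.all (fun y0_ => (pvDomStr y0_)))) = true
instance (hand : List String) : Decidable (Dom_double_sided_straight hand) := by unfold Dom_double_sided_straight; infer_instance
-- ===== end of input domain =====

-- B replaces A's descending scan over all candidate starts 2..10 (each with an inner membership scan of the hand)
-- by one pass over the sorted distinct rank values, detecting maximal consecutive runs and scoring each run once.
-- The Python returns the straight's low card (a truthy int) or False; under the Bool convention both ports return true/false.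

-- ===== PORT A =====
def pvCardDict : PySem.Dict Char Int :=
  PySem.Dict.ofList [('A',14),('2',2),('3',3),('4',4),('5',5),('6',6),('7',7),('8',8),('9',9),('T',10),('J',11),('Q',12),('K',13)]

-- nums = []; for card in hand: nums.append(card_dict[card[0]])   (none = KeyError/IndexError, excluded by Pre_)
def pvNums? (hand : List String) : Option (List Int) :=
  hand.mapM (fun card => (PySem.Str.pyGet? card 0).bind (fun c => PySem.Dict.get? pvCardDict c))

-- for j in range(i, i+4): if j not in nums: straight = False; break
def pvStraightAt (nums : List Int) (i : Int) : Bool :=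
  (PySem.List.pyRange i (i + 4) 1).all (fun j => nums.contains j)

-- for i in reversed(range(2, 11)): … return i   (early return)
def pvLoopA (nums : List Int) : List Int → Bool
  | [] => false
  | i :: rest => if pvStraightAt nums i then true else pvLoopA nums rest

def double_sided_straight (hand : List String) : Bool :=
  match pvNums? hand with
  | none => false
  | some nums => pvLoopA nums (PySem.List.pyRange 2 11 1).reverse

-- ===== PORT B =====
-- start = min(hi-3, 10); return start if start >= lo else 0
def pvBestStart (lo hi : Int) : Int :=
  if lo ≤ min (hi - 3) 10 then min (hi - 3) 10 else 0

-- the for-loop over vals with state (run, best), plus the final flush of the open run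
def pvLoopB : List Int → Option (Int × Int) → Int → Int
  | [], none, best => best
  | [], some (lo, p), best => max best (pvBestStart lo p)
  | v :: rest, none, best => pvLoopB rest (some (v, v)) best
  | v :: rest, some (lo, p), best =>
      if v = p + 1 then pvLoopB rest (some (lo, v)) best
      else pvLoopB rest (some (v, v)) (max best (pvBestStart lo p))

def double_sided_straight_alt (hand : List String) : Bool :=
  match pvNums? hand with
  | none => false
  | some nums =>
      -- vals = sorted({card_dict[card[0]] for card in hand})
      let vals := PySem.List.sorted (PySem.Set.ofList nums) (fun x => x) false
      pvLoopB vals none 0 != 0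

-- ===== PRECONDITION & SPEC =====
-- Pre_ excludes exactly the inputs where A raises: a card that is the empty string (IndexError)
-- or whose first character is not a rank key of card_dict (KeyError).
def pvRankChars : List Char := ['A','2','3','4','5','6','7','8','9','T','J','Q','K']

def Pre_double_sided_straight (hand : List String) : Prop :=
  ∀ card ∈ hand, (card.toList.head?.any (fun c => pvRankChars.contains c)) = true

instance (hand : List String) : Decidable (Pre_double_sided_straight hand) := by
  unfold Pre_double_sided_straight; infer_instance

def pvWitness_double_sided_straight : List String := ["2h", "7s", "Kd"]

def Spec_double_sided_straight (hand : List String) (out : Bool) : Prop := out = double_sided_straight_alt hand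
instance (hand : List String) (out : Bool) : Decidable (Spec_double_sided_straight hand out) := by unfold Spec_double_sided_straight; infer_instance

-- ===== CLAIM (what is proved, stated in full; the proofs are below) =====
def Claim_equal_double_sided_straight : Prop := ∀ (hand : List String), Dom_double_sided_straight hand → Pre_double_sided_straight hand → Spec_double_sided_straight hand (double_sided_straight hand)

-- ===== LEMMAS AND PROOFS =====

-- "there is an eligible 4-card window of consecutive values inside V"
def pvWin (V : List Int) (i : Int) : Prop :=
  2 ≤ i ∧ i ≤ 10 ∧ ∀ j, i ≤ j → j < i + 4 → j ∈ V

lemma pvLoopA_eq_any (nums : List Int) (l : List Int) :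
    pvLoopA nums l = l.any (pvStraightAt nums) := by
  induction l with
  | nil => rfl
  | cons i rest ih => by_cases h : pvStraightAt nums i <;> simp [pvLoopA, h, ih]

lemma pvStraightAt_iff (nums : List Int) (i : Int) :
    pvStraightAt nums i = true ↔ ∀ j, i ≤ j → j < i + 4 → j ∈ nums := by
  unfold pvStraightAt
  rw [List.all_eq_true]
  constructor
  · intro h j h1 h2
    simpa using h j (by rw [PySem.List.mem_pyRange_one]; constructor <;> omega)
  · intro h j hj
    rw [PySem.List.mem_pyRange_one] at hj
    simpa using h j hj.1 hj.2

lemma pvA_true_iff (nums : List Int) :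
    pvLoopA nums (PySem.List.pyRange 2 11 1).reverse = true ↔ ∃ i, pvWin nums i := by
  rw [pvLoopA_eq_any, List.any_eq_true]
  constructor
  · rintro ⟨i, hi, hs⟩
    rw [List.mem_reverse, PySem.List.mem_pyRange_one] at hi
    exact ⟨i, by omega, by omega, (pvStraightAt_iff nums i).1 hs⟩
  · rintro ⟨i, h2, h10, hw⟩
    refine ⟨i, ?_, (pvStraightAt_iff nums i).2 hw⟩
    rw [List.mem_reverse, PySem.List.mem_pyRange_one]; omega

lemma pvLoopB_ge (l : List Int) (run : Option (Int × Int)) (best : Int) :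
    best ≤ pvLoopB l run best := by
  induction l generalizing run best with
  | nil => rcases run with _ | ⟨lo, p⟩ <;> simp [pvLoopB]
  | cons v rest ih =>
    rcases run with _ | ⟨lo, p⟩
    · simpa [pvLoopB] using ih (some (v, v)) best
    · simp only [pvLoopB]
      split
      · exact ih _ _
      · exact le_trans (le_max_left _ _) (ih (some (v, v)) _)

-- a closed run [lo..p] ⊆ V with 2 ≤ lo that scores nonzero yields a window
lemma pvClose_win {V : List Int} {lo p : Int} (hlo2 : 2 ≤ lo)
    (hrun : ∀ j, lo ≤ j → j ≤ p → j ∈ V) (hne : pvBestStart lo p ≠ 0) :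
    ∃ i, pvWin V i := by
  unfold pvBestStart at hne
  split at hne
  · rename_i hge
    refine ⟨min (p - 3) 10, by omega, by omega, ?_⟩
    intro j h1 h2
    exact hrun j (by omega) (by omega)
  · exact absurd rfl hne

lemma pvLoopB_sound (V : List Int) (l : List Int) :
    ∀ lo p best, (∀ x ∈ l, x ∈ V ∧ 2 ≤ x) → (∀ j, lo ≤ j → j ≤ p → j ∈ V) → 2 ≤ lo →
    (best ≠ 0 → ∃ i, pvWin V i) → pvLoopB l (some (lo, p)) best ≠ 0 → ∃ i, pvWin V i := by
  induction l with
  | nil =>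
    intro lo p best _ hrun hlo2 hbest h
    simp only [pvLoopB] at h
    rcases max_cases best (pvBestStart lo p) with ⟨he, _⟩ | ⟨he, _⟩
    · exact hbest (he ▸ h)
    · exact pvClose_win hlo2 hrun (he ▸ h)
  | cons v rest ih =>
    intro lo p best hmem hrun hlo2 hbest h
    simp only [pvLoopB] at h
    split at h
    · rename_i hv
      refine ih lo v best (fun x hx => hmem x (by simp [hx])) ?_ hlo2 hbest h
      intro j h1 h2
      rcases lt_or_ge j (p + 1) with hj | hj
      · exact hrun j h1 (by omega)
      · have : j = v := by omega
        exact this ▸ (hmem v (by simp)).1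
    · refine ih v v _ (fun x hx => hmem x (by simp [hx])) ?_ (hmem v (by simp)).2 ?_ h
      · intro j h1 h2
        have : j = v := by omega
        exact this ▸ (hmem v (by simp)).1
      · intro hne
        rcases max_cases best (pvBestStart lo p) with ⟨he, _⟩ | ⟨he, _⟩
        · exact hbest (he ▸ hne)
        · exact pvClose_win hlo2 hrun (he ▸ hne)

lemma pvLoopB_sound_none (V l : List Int) (hmem : ∀ x ∈ l, x ∈ V ∧ 2 ≤ x)
    (h : pvLoopB l none 0 ≠ 0) : ∃ i, pvWin V i := by
  cases l with
  | nil => simp [pvLoopB] at h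
  | cons v rest =>
    simp only [pvLoopB] at h
    refine pvLoopB_sound V rest v v 0 (fun x hx => hmem x (by simp [hx])) ?_
      (hmem v (by simp)).2 (by intro hc; exact absurd rfl hc) h
    intro j h1 h2
    have : j = v := by omega
    exact this ▸ (hmem v (by simp)).1

lemma pvLoopB_complete (l : List Int) :
    ∀ lo p best i, l.Pairwise (· < ·) → (∀ x ∈ l, p < x) → lo ≤ p → 0 ≤ best →
    2 ≤ i → i ≤ 10 →
    ((lo ≤ i ∧ i ≤ p + 1 ∧ ∀ j, p < j → j ≤ i + 3 → j ∈ l) ∨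
     (p < i ∧ ∀ j, i ≤ j → j ≤ i + 3 → j ∈ l)) →
    pvLoopB l (some (lo, p)) best ≠ 0 := by
  induction l with
  | nil =>
    intro lo p best i _ _ hlop hb hi2 hi10 hcase
    rcases hcase with ⟨hloi, hip, hfut⟩ | ⟨_, hwin⟩
    · have hp : i + 3 ≤ p := by
        by_contra hc
        exact absurd (hfut (p + 1) (by omega) (by omega)) (by simp)
      have hbs : pvBestStart lo p = min (p - 3) 10 := by
        unfold pvBestStart; rw [if_pos (by omega)]
      simp only [pvLoopB]
      have := le_max_right best (pvBestStart lo p)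
      omega
    · exact absurd (hwin i (le_refl i) (by omega)) (by simp)
  | cons v rest ih =>
    intro lo p best i hpw hgt hlop hb hi2 hi10 hcase
    have hpwr : rest.Pairwise (· < ·) := hpw.tail
    have hvlt : ∀ x ∈ rest, v < x := fun x hx => List.rel_of_pairwise_cons hpw hx
    have hvp : p < v := hgt v (List.mem_cons_self)
    simp only [pvLoopB]
    split
    · rename_i hv
      rcases hcase with ⟨hloi, hip, hfut⟩ | ⟨hpi, hwin⟩
      · refine ih lo v best i hpwr hvlt (by omega) hb hi2 hi10 (Or.inl ⟨hloi, by omega, ?_⟩)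
        intro j h1 h2
        rcases List.mem_cons.1 (hfut j (by omega) h2) with he | hj
        · exact absurd he (by omega)
        · exact hj
      · rcases lt_or_ge (v + 1) i with hlt | hge
        · refine ih lo v best i hpwr hvlt (by omega) hb hi2 hi10 (Or.inr ⟨by omega, ?_⟩)
          intro j h1 h2
          rcases List.mem_cons.1 (hwin j h1 h2) with he | hj
          · exact absurd he (by omega)
          · exact hj
        · refine ih lo v best i hpwr hvlt (by omega) hb hi2 hi10 (Or.inl ⟨by omega, by omega, ?_⟩)
          intro j h1 h2
          rcases List.mem_cons.1 (hwin j (by omega) h2) with he | hj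
          · exact absurd he (by omega)
          · exact hj
    · rename_i hv
      set best' := max best (pvBestStart lo p) with hbest'
      have hb' : 0 ≤ best' := le_trans hb (le_max_left _ _)
      rcases hcase with ⟨hloi, hip, hfut⟩ | ⟨hpi, hwin⟩
      · -- the run must be finished: i + 3 ≤ p, and it scores ≥ i ≥ 2
        have hp : i + 3 ≤ p := by
          by_contra hc
          rcases List.mem_cons.1 (hfut (p + 1) (by omega) (by omega)) with he | hj
          · exact hv he.symm
          · exact absurd (hvlt _ hj) (by omega)
        have hbs : pvBestStart lo p = min (p - 3) 10 := by
          unfold pvBestStart; rw [if_pos (by omega)]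
        have h1 : best' ≠ 0 := by have := le_max_right best (pvBestStart lo p); omega
        have := pvLoopB_ge rest (some (v, v)) best'
        omega
      · -- window lies beyond p; its low card i is v, v+1, or further right
        have hvi : v ≤ i := by
          rcases List.mem_cons.1 (hwin i (le_refl i) (by omega)) with he | hj
          · omega
          · exact le_of_lt (hvlt _ hj)
        rcases lt_or_ge (v + 1) i with hlt | hge
        · refine ih v v best' i hpwr hvlt (le_refl v) hb' hi2 hi10 (Or.inr ⟨by omega, ?_⟩)
          intro j h1 h2
          rcases List.mem_cons.1 (hwin j (by omega) h2) with he | hj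
          · exact absurd he (by omega)
          · exact hj
        · refine ih v v best' i hpwr hvlt (le_refl v) hb' hi2 hi10 (Or.inl ⟨hvi, by omega, ?_⟩)
          intro j h1 h2
          rcases List.mem_cons.1 (hwin j (by omega) h2) with he | hj
          · exact absurd he (by omega)
          · exact hj

lemma pvLoopB_complete_none (l : List Int) (i : Int) (hpw : l.Pairwise (· < ·))
    (hi2 : 2 ≤ i) (hi10 : i ≤ 10) (hwin : ∀ j, i ≤ j → j ≤ i + 3 → j ∈ l) :
    pvLoopB l none 0 ≠ 0 := by
  cases l with
  | nil => exact absurd (hwin i (le_refl i) (by omega)) (by simp)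
  | cons v rest =>
    have hvlt : ∀ x ∈ rest, v < x := fun x hx => List.rel_of_pairwise_cons hpw hx
    have hvi : v ≤ i := by
      rcases List.mem_cons.1 (hwin i (le_refl i) (by omega)) with he | hj
      · omega
      · exact le_of_lt (hvlt _ hj)
    simp only [pvLoopB]
    rcases lt_or_ge (v + 1) i with hlt | hge
    · refine pvLoopB_complete rest v v 0 i hpw.tail hvlt (le_refl v) (le_refl 0) hi2 hi10 (Or.inr ⟨by omega, ?_⟩)
      intro j h1 h2
      rcases List.mem_cons.1 (hwin j (by omega) h2) with he | hj
      · exact absurd he (by omega)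
      · exact hj
    · refine pvLoopB_complete rest v v 0 i hpw.tail hvlt (le_refl v) (le_refl 0) hi2 hi10 (Or.inl ⟨hvi, by omega, ?_⟩)
      intro j h1 h2
      rcases List.mem_cons.1 (hwin j (by omega) h2) with he | hj
      · exact absurd he (by omega)
      · exact hj

-- every rank character maps to a value in [2,14]
lemma pvRank_lookup : ∀ c ∈ pvRankChars,
    ((PySem.Dict.get? pvCardDict c).any (fun v => decide (2 ≤ v ∧ v ≤ 14))) = true := by
  intro c hmem
  fin_cases hmem <;> decide

lemma pvNums_of_pre (hand : List String) (hpre : Pre_double_sided_straight hand) :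
    ∃ nums, pvNums? hand = some nums ∧ ∀ x ∈ nums, 2 ≤ x := by
  induction hand with
  | nil => exact ⟨[], rfl, by simp⟩
  | cons card rest ih =>
    rw [Pre_double_sided_straight, List.forall_mem_cons] at hpre
    obtain ⟨hcard, hrest⟩ := hpre
    obtain ⟨nums, hn, hv⟩ := ih hrest
    obtain ⟨c, hc, hmem⟩ := by simpa [Option.any_eq_true] using hcard
    have hget : PySem.List.pyGet? card.toList 0 = some c := by
      rw [PySem.List.pyGet?_zero, ← List.head?_eq_getElem?]; exact hc
    obtain ⟨v, hvget, hv2, _⟩ := by simpa [Option.any_eq_true] using pvRank_lookup c hmem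
    refine ⟨v :: nums, ?_, ?_⟩
    · rw [pvNums?] at hn ⊢
      have hn' : List.mapM (fun card => (PySem.List.pyGet? card.toList 0).bind
          fun c => PySem.Dict.get? pvCardDict c) rest = some nums := by
        simpa [PySem.Str.pyGet?] using hn
      simp [List.mapM_cons, PySem.Str.pyGet?, hget, hvget, hn']
    · intro x hx
      rcases List.mem_cons.1 hx with he | hx
      · omega
      · exact hv x hx

-- ===== VERDICT (by name: the statement is the Claim_ definition above) =====
theorem double_sided_straight_spec : Claim_equal_double_sided_straight := by
  intro hand _ hpre
  unfold Spec_double_sided_straight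
  obtain ⟨nums, hn, hv⟩ := pvNums_of_pre hand hpre
  unfold double_sided_straight double_sided_straight_alt
  rw [hn]
  set vals := PySem.List.sorted (PySem.Set.ofList nums) (fun x => x) false with hvals
  have hmemv : ∀ x, x ∈ vals ↔ x ∈ nums := by
    intro x
    rw [hvals, PySem.List.mem_sorted, PySem.Set.mem_ofList]
  have hpw : vals.Pairwise (· < ·) := PySem.List.sorted_ofList_pairwise_lt nums
  rw [Bool.eq_iff_iff, pvA_true_iff, bne_iff_ne]
  constructor
  · rintro ⟨i, h2, h10, hw⟩
    exact pvLoopB_complete_none vals i hpw h2 h10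
      (fun j h1 hj => (hmemv j).2 (hw j h1 (by omega)))
  · intro h
    obtain ⟨i, h2, h10, hw⟩ := pvLoopB_sound_none vals vals
      (fun x hx => ⟨hx, hv x ((hmemv x).1 hx)⟩) h
    exact ⟨i, h2, h10, fun j h1 hj => (hmemv j).1 (hw j h1 (by omega))⟩
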